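-- pv_equiv track=rewrite | github.com/Anon3605/CSE220 | Lab_01/Task_08.py | array_series
-- ===== SOURCE A (Python) =====
-- def array_series(n):
--   array =[0]*(n*n)
--   elements=0
--   while elements <=((n*n)-1):
--     for i in range(n):
--        for j in range(n-(i+1)):
--          array[elements] = 0
--          elements+=1
--        for j in range(i+1,0,-1):
--         array[elements]=j
--         elements+=1
--   return array
-- ===== SOURCE B (Python) =====
-- def array_series(n):
--   return [0 if k // n + k % n < n - 1 else n - k % n for k in range(n * n)]
-- ===== Notes on version B (the rewrite author's own statement) =====
-- stated objective: idiomatic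
-- what changed: Replaces A's while-loop with a running write counter and three nested fill loops by a single flat comprehension over range(n*n) that computes each cell directly from k // n and k % n.
-- outside the precondition, e.g. on array_series(-2): A does not finish within the time limit, B returns [-2, -1, -2, -1]
import Mathlib
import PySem

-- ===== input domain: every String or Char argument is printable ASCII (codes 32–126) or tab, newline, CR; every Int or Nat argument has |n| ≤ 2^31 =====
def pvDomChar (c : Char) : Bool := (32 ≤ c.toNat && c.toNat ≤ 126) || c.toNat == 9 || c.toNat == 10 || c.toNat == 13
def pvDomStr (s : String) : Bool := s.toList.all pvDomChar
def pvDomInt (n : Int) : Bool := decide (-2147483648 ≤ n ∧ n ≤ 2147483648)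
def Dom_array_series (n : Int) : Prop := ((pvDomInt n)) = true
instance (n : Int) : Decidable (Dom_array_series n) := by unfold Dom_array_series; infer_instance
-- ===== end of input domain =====

-- B replaces A's while-loop with counter and three nested write loops by a single
-- flat comprehension computing each position's value from k // n and k % n (idiomatic).

-- ===== PORT A =====
-- one pass of A's while-body: for i in range(n): write n-(i+1) zeros, then the countdown i+1..1.
-- array[elements] = v is List.set (indices stay in range on every input A terminates on).
def pvPassA (n : Int) (st : List Int × Int) : List Int × Int :=
  (PySem.List.pyRange 0 n 1).foldl (fun st i =>
    let st1 := (PySem.List.pyRange 0 (n - (i + 1)) 1).foldl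
      (fun p _ => (p.1.set p.2.toNat 0, p.2 + 1)) st
    (PySem.List.pyRange (i + 1) 0 (-1)).foldl
      (fun p j => (p.1.set p.2.toNat j, p.2 + 1)) st1) st

-- the while loop, made total with fuel; the fuel is never exhausted on Pre_ inputs
-- (at most one pass of the body runs before the guard fails).
def pvWhileA (n : Int) : Nat → List Int × Int → List Int
  | 0, st => st.1
  | f + 1, st => if st.2 ≤ n * n - 1 then pvWhileA n f (pvPassA n st) else st.1

def array_series (n : Int) : List Int :=
  pvWhileA n ((n * n).toNat + 1) (List.replicate (n * n).toNat 0, 0)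

-- ===== PORT B =====
def array_series_alt (n : Int) : List Int :=
  (PySem.List.pyRange 0 (n * n) 1).map (fun k =>
    if PySem.Int.floordiv k n + PySem.Int.mod k n < n - 1 then 0
    else n - PySem.Int.mod k n)

-- ===== PRECONDITION & SPEC =====
-- Pre_ excludes n < 0: there A's while-body makes no progress (range(n) is empty) and A loops forever.
def Pre_array_series (n : Int) : Prop := 0 ≤ n
instance (n : Int) : Decidable (Pre_array_series n) := by unfold Pre_array_series; infer_instance
def pvWitness_array_series : Int := (3)

def Spec_array_series (n : Int) (out : List Int) : Prop := out = array_series_alt n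
instance (n : Int) (out : List Int) : Decidable (Spec_array_series n out) := by unfold Spec_array_series; infer_instance

-- ===== CLAIM (what is proved, stated in full; the proofs are below) =====
def Claim_equal_array_series : Prop := ∀ (n : Int), Dom_array_series n → Pre_array_series n → Spec_array_series n (array_series n)

-- ===== LEMMAS AND PROOFS =====

-- row i of the intended array, and the concatenation of rows i, i+1, …, n-1 (k rows)
def pvRow (n i : Int) : List Int :=
  List.replicate (n - 1 - i).toNat 0 ++ PySem.List.pyRange (i + 1) 0 (-1)

def pvRows : Nat → Int → Int → List Int
  | 0, _, _ => []
  | k + 1, i, n => pvRow n i ++ pvRows k (i + 1) n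

theorem set_append_length (pre : List Int) (x v : Int) (rest : List Int) :
    (pre ++ x :: rest).set pre.length v = pre ++ v :: rest := by
  induction pre with
  | nil => simp
  | cons a pre ih => simp [ih]

-- writing the values g(j), j ∈ L, at consecutive positions starting at |pre|
theorem foldl_write (g : Int → Int) (L : List Int) :
    ∀ (pre rest : List Int) (e : Int), e = (pre.length : Int) → L.length ≤ rest.length →
    L.foldl (fun p j => (p.1.set p.2.toNat (g j), p.2 + 1)) (pre ++ rest, e)
      = (pre ++ L.map g ++ rest.drop L.length, e + L.length) := by
  induction L with
  | nil => intro pre rest e he _; simp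
  | cons v L ih =>
    intro pre rest e he hlen
    subst he
    cases rest with
    | nil => simp at hlen
    | cons r rs =>
      have hset : (pre ++ r :: rs).set ((pre.length : Int)).toNat (g v) = pre ++ g v :: rs := by
        simp [set_append_length pre r (g v) rs]
      have hidx : ((pre.length : Int) + 1) = (((pre ++ [g v]).length : Int)) := by
        simp
      have := ih (pre ++ [g v]) rs ((pre.length : Int) + 1) hidx (by simpa using hlen)
      simp only [List.foldl_cons, hset]
      rw [show pre ++ g v :: rs = (pre ++ [g v]) ++ rs by simp, this]
      rw [Prod.mk.injEq]
      refine ⟨by simp, by simp; ring⟩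

theorem foldl_write_zero (L : List Int) (pre rest : List Int) (h : L.length ≤ rest.length) :
    L.foldl (fun p (_ : Int) => (p.1.set p.2.toNat (0 : Int), p.2 + 1)) (pre ++ rest, (pre.length : Int))
      = (pre ++ List.replicate L.length 0 ++ rest.drop L.length, (pre.length : Int) + L.length) := by
  have := foldl_write (fun _ => 0) L pre rest ((pre.length : Int)) rfl h
  simpa [List.map_const'] using this

-- one pass of A's body, starting at row i with the tail still all zeros, writes rows i..n-1
theorem passA_rows : ∀ (k : Nat) (i n : Int), 0 ≤ i → i + k = n →
    ∀ (pre : List Int), (pre.length : Int) = i * n →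
    (PySem.List.pyRange i n 1).foldl (fun st i =>
      let st1 := (PySem.List.pyRange 0 (n - (i + 1)) 1).foldl
        (fun p _ => (p.1.set p.2.toNat 0, p.2 + 1)) st
      (PySem.List.pyRange (i + 1) 0 (-1)).foldl
        (fun p j => (p.1.set p.2.toNat j, p.2 + 1)) st1)
      (pre ++ List.replicate (k * n.toNat) 0, (pre.length : Int))
      = (pre ++ pvRows k i n, (pre.length : Int) + k * n) := by
  intro k
  induction k with
  | zero =>
    intro i n hi hin pre hpre
    simp [PySem.List.pyRange_one_eq_nil (by omega : n ≤ i), pvRows]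
  | succ k ih =>
    intro i n hi hin pre hpre
    have hin' : i < n := by omega
    have hnt : (n.toNat : Int) = n := by omega
    have hz : (PySem.List.pyRange 0 (n - (i + 1)) 1).length = k := by
      rw [PySem.List.length_pyRange_one]; omega
    have hcd : (PySem.List.pyRange (i + 1) 0 (-1)).length = (i + 1).toNat := by
      rw [PySem.List.length_pyRange_neg_one]; omega
    have h1 : 1 ≤ n.toNat := by omega
    have hklek : k + (i + 1).toNat ≤ (k + 1) * n.toNat := by
      have : (k + 1) * 1 ≤ (k + 1) * n.toNat := Nat.mul_le_mul_left _ h1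
      have hnt2 : n.toNat = i.toNat + k + 1 := by omega
      have hit : (i + 1).toNat = i.toNat + 1 := by omega
      nlinarith
    rw [PySem.List.pyRange_one_cons hin', List.foldl_cons]
    simp only []
    rw [foldl_write_zero _ pre _ (by rw [hz]; simp; omega)]
    rw [hz, List.drop_replicate]
    rw [show pre ++ List.replicate k (0 : Int) ++ List.replicate ((k + 1) * n.toNat - k) 0
          = (pre ++ List.replicate k (0 : Int)) ++ List.replicate ((k + 1) * n.toNat - k) 0 by simp]
    have h2 := foldl_write id (PySem.List.pyRange (i + 1) 0 (-1)) (pre ++ List.replicate k (0 : Int))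
      (List.replicate ((k + 1) * n.toNat - k) 0) ((pre.length : Int) + (k : Int))
      (by simp) (by rw [hcd, List.length_replicate]; omega)
    simp only [id_eq, List.map_id] at h2
    rw [h2, hcd, List.drop_replicate]
    have hrep : (k + 1) * n.toNat - k - (i + 1).toNat = k * n.toNat := by
      have hnt2 : n.toNat = i.toNat + k + 1 := by omega
      have hit : (i + 1).toNat = i.toNat + 1 := by omega
      rw [hnt2, hit]; ring_nf; omega
    rw [hrep]
    rw [show pre ++ List.replicate k (0 : Int) ++ PySem.List.pyRange (i + 1) 0 (-1) ++ List.replicate (k * n.toNat) 0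
          = (pre ++ pvRow n i) ++ List.replicate (k * n.toNat) 0 by
        simp [pvRow, show (n - 1 - i).toNat = k by omega]]
    have hpre' : (((pre ++ pvRow n i).length : Int)) = (i + 1) * n := by
      simp [pvRow, PySem.List.length_pyRange_neg_one]
      have hmax : max (n - 1 - i) 0 + max (i + 1) 0 = n := by omega
      have hexp : (i + 1) * n = i * n + n := by ring
      linarith
    have heq : (pre.length : Int) + (k : Int) + ((i + 1).toNat : Int)
        = (((pre ++ pvRow n i).length : Int)) := by
      simp [pvRow, PySem.List.length_pyRange_neg_one]
      omega
    rw [heq, ih (i + 1) n (by omega) (by omega) (pre ++ pvRow n i) hpre']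
    rw [Prod.mk.injEq]
    refine ⟨by simp [pvRows], ?_⟩
    rw [hpre', hpre]
    push_cast
    ring

-- one row of B's comprehension
theorem pvRowB (i n : Int) (hi : 0 ≤ i) (hin : i < n) :
    (List.range n.toNat).map ((fun x =>
      if PySem.Int.floordiv x n + PySem.Int.mod x n < n - 1 then 0
      else n - PySem.Int.mod x n) ∘ fun c : Nat => i * n + (c : Int)) = pvRow n i := by
  have hn : 0 < n := by omega
  have hfd : ∀ c : Nat, (c : Int) < n → PySem.Int.floordiv (i * n + (c : Int)) n = i := by
    intro c hc
    rw [PySem.Int.floordiv_eq_iff_of_pos hn]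
    constructor
    · nlinarith [Int.natCast_nonneg c]
    · nlinarith
  have hmd : ∀ c : Nat, (c : Int) < n → PySem.Int.mod (i * n + (c : Int)) n = (c : Int) := by
    intro c hc
    have h := PySem.Int.floordiv_mul_add_mod (i * n + (c : Int)) n
    rw [hfd c hc] at h; linarith
  have hsplit : n.toNat = (n - 1 - i).toNat + (i + 1).toNat := by omega
  rw [hsplit, List.range_add, List.map_append]
  unfold pvRow
  congr 1
  · rw [List.eq_replicate_iff]
    refine ⟨by simp, ?_⟩
    intro b hb
    simp only [List.mem_map, List.mem_range, Function.comp] at hb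
    obtain ⟨c, hc, rfl⟩ := hb
    have hc' : (c : Int) < n := by omega
    rw [hfd c hc', hmd c hc', if_pos (by omega)]
  · rw [PySem.List.pyRange_neg_one, List.map_map, show (i + 1 - 0 : Int) = i + 1 by ring]
    apply List.map_congr_left
    intro c hc
    simp only [List.mem_range] at hc
    simp only [Function.comp]
    have hc' : ((((n - 1 - i).toNat + c : Nat)) : Int) < n := by omega
    rw [hfd _ hc', hmd _ hc', if_neg (by push_cast; omega)]
    push_cast
    omega

-- B produces the same rows
theorem altB_rows : ∀ (k : Nat) (i n : Int), 0 ≤ i → i + k = n →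
    (PySem.List.pyRange (i * n) (n * n) 1).map (fun x =>
      if PySem.Int.floordiv x n + PySem.Int.mod x n < n - 1 then 0
      else n - PySem.Int.mod x n) = pvRows k i n := by
  intro k
  induction k with
  | zero =>
    intro i n hi hin
    have : i * n = n * n := by rw [show i = n by omega]
    simp [this, PySem.List.pyRange_one_eq_nil (le_refl (n * n)), pvRows]
  | succ k ih =>
    intro i n hi hin
    have hin' : i < n := by omega
    have hn : 0 < n := by omega
    rw [PySem.List.pyRange_one_append (i * n) ((i + 1) * n) (n * n) (by nlinarith) (by nlinarith),
      List.map_append]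
    show _ ++ _ = pvRow n i ++ pvRows k (i + 1) n
    congr 1
    · rw [PySem.List.pyRange_one, show ((i + 1) * n - i * n) = n by ring, List.map_map]
      exact pvRowB i n hi hin'
    · exact ih (i + 1) n (by omega) (by omega)

-- ===== VERDICT (by name: the statement is the Claim_ definition above) =====
theorem array_series_spec : Claim_equal_array_series := by
  intro n _ hpre
  unfold Spec_array_series
  rcases lt_or_eq_of_le (hpre : (0 : Int) ≤ n) with hn | hn
  · have h1 : (1 : Int) ≤ n * n := by nlinarith
    have hsq : (n * n).toNat = n.toNat * n.toNat := by
      rw [Int.toNat_mul (by omega) (by omega)]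
    have hnc : ((n.toNat : Int)) = n := by omega
    obtain ⟨t, ht⟩ : ∃ t, (n * n).toNat = t + 1 := ⟨(n * n).toNat - 1, by omega⟩
    unfold array_series
    rw [ht]
    simp only [pvWhileA]
    rw [if_pos (show ((List.replicate (t + 1) (0 : Int), (0 : Int)).2 ≤ n * n - 1) by
      simp; omega)]
    have hp := passA_rows n.toNat 0 n (le_refl 0) (by omega) [] (by simp)
    simp only [List.nil_append, List.length_nil, Nat.cast_zero] at hp
    unfold pvPassA
    rw [show t + 1 = n.toNat * n.toNat by omega, hp]
    rw [if_neg (show ¬((pvRows n.toNat 0 n, (0 : Int) + (n.toNat : Int) * n).2 ≤ n * n - 1) by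
      simp [hnc])]
    have hb := altB_rows n.toNat 0 n (le_refl 0) (by omega)
    simp only [zero_mul] at hb
    unfold array_series_alt
    rw [hb]
  · unfold array_series array_series_alt
    rw [← hn]
    decide
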